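-- pv_equiv track=rewrite | github.com/QuBenhao/LeetCode | problems/problems_3801/solution.py | minMergeCost
-- ===== SOURCE A (Python) =====
-- from typing import List
--
-- from bisect import bisect_right
-- from math import inf
--
-- def minMergeCost(lists: List[List[int]]) -> int:
--     n = len(lists)
--     total = 1 << n
--     g, h = [0] * total, [0] * total
--     for i in range(1, total):
--         for j in range(n):
--             if (i >> j) & 1:
--                 g[i] += len(lists[j])
--         head, tail = -int(1e9), int(1e9)
--         while head < tail:
--             mid = (head + tail) >> 1
--             cnt = 0
--             for j in range(n):
--                 if (i >> j) & 1:
--                     cnt += bisect_right(lists[j], mid)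
--             if cnt >= (g[i] + 1) // 2:
--                 tail = mid
--             else:
--                 head = mid + 1
--         h[i] = head
--
--     f = [inf] * total
--     for j in range(n):
--         f[1 << j] = 0
--     for i in range(1, total):
--         if f[i] == 0:
--             continue
--         j = (i - 1) & i
--         while j: # 枚举子集
--             k = i ^ j
--             f[i] = min(f[i], f[j] + f[k] + g[j] + g[k] + abs(h[j] - h[k]))
--             j = (j - 1) & i
--     return f[total - 1]
-- ===== SOURCE B (Python) =====
-- from bisect import bisect_right
--
-- def minMergeCost(lists):
--     n = len(lists)
--     total = 1 << n
--     LO, HI = -10**9, 10**9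
--     g = [0] * total
--     h = [LO] * total
--     for i in range(1, total):
--         g[i] = sum(len(lists[j]) for j in range(n) if (i >> j) & 1)
--         m = (g[i] + 1) // 2
--         # bitwise galloping search instead of A's halving loop: grow y by descending
--         # powers of two to the largest y in [LO-1, HI] whose count stays below m,
--         # then the answer is one past y (clamped to HI)
--         y = LO - 1
--         for k in range(31, -1, -1):
--             t = y + (1 << k)
--             if t <= HI and sum(bisect_right(lists[j], t) for j in range(n) if (i >> j) & 1) < m:
--                 y = t
--         h[i] = min(y + 1, HI)
--     # top-down memoized recursion instead of A's bottom-up inf-table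
--     memo = {}
--     def f(i):
--         if i & (i - 1) == 0:
--             return 0
--         if i in memo:
--             return memo[i]
--         best = None
--         j = (i - 1) & i
--         while j:
--             c = f(j) + f(i ^ j) + g[j] + g[i ^ j] + abs(h[j] - h[i ^ j])
--             if best is None or c < best:
--                 best = c
--             j = (j - 1) & i
--         memo[i] = best
--         return best
--     return f(total - 1)
-- ===== Notes on version B (the rewrite author's own statement) =====
-- stated objective: alternative
-- what changed: Each subset median is found by a bitwise galloping search (adding descending powers of two to the largest value whose count stays below the median rank) instead of A's interval-halving binary search, and the partition DP is a top-down memoized recursion instead of A's bottom-up table initialised with inf.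
-- outside the precondition, e.g. on minMergeCost([]): A returns inf, B returns 0
import Mathlib
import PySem

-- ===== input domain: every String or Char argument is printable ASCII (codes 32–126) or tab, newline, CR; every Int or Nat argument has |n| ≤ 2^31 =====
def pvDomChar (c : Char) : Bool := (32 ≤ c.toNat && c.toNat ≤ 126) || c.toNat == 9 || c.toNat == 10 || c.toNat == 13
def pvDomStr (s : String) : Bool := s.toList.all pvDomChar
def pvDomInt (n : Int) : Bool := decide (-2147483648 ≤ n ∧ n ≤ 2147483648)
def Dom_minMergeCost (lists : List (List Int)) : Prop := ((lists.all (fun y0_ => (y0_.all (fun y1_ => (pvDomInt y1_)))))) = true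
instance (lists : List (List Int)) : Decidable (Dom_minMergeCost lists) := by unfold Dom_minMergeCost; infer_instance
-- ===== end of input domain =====

-- B replaces A's per-subset interval-halving value search by a bitwise galloping search
-- (descending powers of two), and A's bottom-up inf-table partition DP by a top-down
-- memoized recursion over the same submask chain (alternative decomposition, similar cost);
-- equivalence is about the return value only (neither mutates its argument).

-- ===== PORT A =====

-- the submask chain j = s, (j-1)&i, ... both Pythons enumerate (A's inner while, B's while)
def jChain (i s : Nat) : List Nat :=
  if s = 0 then [] else s :: jChain i ((s - 1) &&& i)
  decreasing_by exact Nat.lt_of_le_of_lt Nat.and_le_left (by omega)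

-- bounds of Python's (head+tail)>>1 (floor division), used for termination of bsInt
theorem floordiv_two_bounds (a b : Int) (h : a < b) :
    a ≤ PySem.Int.floordiv (a + b) 2 ∧ PySem.Int.floordiv (a + b) 2 < b := by
  simp only [PySem.Int.floordiv, Int.fdiv_eq_ediv]
  omega

-- A's `while head < tail` binary search, parameterised by the test `cnt >= (g+1)//2`
def bsInt (P : Int → Bool) (head tail : Int) : Int :=
  if h : head < tail then
    let mid := PySem.Int.floordiv (head + tail) 2   -- (head + tail) >> 1
    if P mid then bsInt P head mid else bsInt P (mid + 1) tail
  else head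
  termination_by (tail - head).toNat
  decreasing_by
  · have := floordiv_two_bounds head tail h; omega
  · have := floordiv_two_bounds head tail h; omega

-- g[i] : total length of the selected lists (A's inner bit loop)
def gA (lists : List (List Int)) (i : Nat) : Int :=
  (List.range lists.length).foldl
    (fun acc j => if (i >>> j) &&& 1 = 1 then acc + ((lists.getD j []).length : Int) else acc) 0

-- cnt : sum of bisect_right(lists[j], mid) over selected j (bisect_right = PySem.List.bisectRight)
def cntA (lists : List (List Int)) (i : Nat) (mid : Int) : Int :=
  (List.range lists.length).foldl
    (fun acc j => if (i >>> j) &&& 1 = 1 then acc + ((PySem.List.bisectRight (lists.getD j []) mid : Nat) : Int) else acc) 0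

-- h[i] : A's binary search on values
def hA (lists : List (List Int)) (i : Nat) : Int :=
  bsInt (fun mid => decide (PySem.Int.floordiv (gA lists i + 1) 2 ≤ cntA lists i mid))
    (-1000000000) 1000000000

-- float('inf') sentinel of A's f-table is Option.none; min/+ with inf:
def optAdd : Option Int → Option Int → Option Int
  | some a, some b => some (a + b)
  | _, _ => none
def optMin : Option Int → Option Int → Option Int
  | some a, some b => some (min a b)
  | none, x => x
  | x, none => x

-- one iteration of A's `for i in range(1, total)` DP loop (the row for subset i)
def rowA (g h : Nat → Int) (f : List (Option Int)) (i : Nat) : List (Option Int) :=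
  if f.getD i none = some 0 then f          -- if f[i] == 0: continue
  else (jChain i ((i - 1) &&& i)).foldl
    (fun f j =>
      let k := i ^^^ j
      f.set i (optMin (f.getD i none)
        (optAdd (optAdd (f.getD j none) (f.getD k none))
          (some (g j + g k + |h j - h k|))))) f

def minMergeCost (lists : List (List Int)) : Int :=
  let n := lists.length
  let total := 2 ^ n                                   -- 1 << n
  -- g[i], h[i] are written once per index before any read, so they are ported as functions
  let f0 : List (Option Int) := List.replicate total none          -- [inf] * total
  let f1 := (List.range n).foldl (fun f j => f.set (2 ^ j) (some 0)) f0
  let f2 := (List.range' 1 (total - 1)).foldl (rowA (gA lists) (hA lists)) f1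
  match f2.getD (total - 1) none with
  | some v => v
  | none => 0       -- Python returns float inf here (only n = 0); outside Pre_

-- ===== PORT B =====

-- B's bitwise galloping search: add descending powers of two (k = 31..0) to y while the
-- count stays below the rank; structural recursion on the remaining bit count
def gallop (P : Int → Bool) (hi : Int) : Nat → Int → Int
  | 0, y => y
  | k + 1, y =>
    let t := y + 2 ^ k
    gallop P hi k (if t ≤ hi ∧ P t = false then t else y)

-- B's g[i] (a sum comprehension computing the same total length as A's loop: shared fold gA)
-- and B's h[i] via the galloping search
def hB (lists : List (List Int)) (i : Nat) : Int :=
  let m := PySem.Int.floordiv (gA lists i + 1) 2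
  let y := gallop (fun t => decide (m ≤ cntA lists i t)) 1000000000 32 (-1000000000 - 1)
  min (y + 1) 1000000000

-- B's memoized recursion f(i): the memo dict is threaded as an array of Option Int
-- (none = not yet computed); fuel only makes the recursion structural (never exhausted
-- when fuel > i, proved below)
def fBm (g h : Nat → Int) : Nat → Nat → List (Option Int) → Int × List (Option Int)
  | 0, _, memo => (0, memo)
  | fuel + 1, i, memo =>
    if i &&& (i - 1) = 0 then (0, memo)
    else
      match memo.getD i none with
      | some v => (v, memo)
      | none =>
        let r := (jChain i ((i - 1) &&& i)).foldl
          (fun bm j =>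
            let r1 := fBm g h fuel j bm.2
            let r2 := fBm g h fuel (i ^^^ j) r1.2
            (optMin bm.1 (some (r1.1 + r2.1 + g j + g (i ^^^ j) + |h j - h (i ^^^ j)|)), r2.2))
          ((none : Option Int), memo)
        match r.1 with
        | some b => (b, r.2.set i b)   -- memo[i] = best; return best
        | none => (0, r.2)             -- unreachable: the submask chain is nonempty here

def minMergeCost_alt (lists : List (List Int)) : Int :=
  let total := 2 ^ lists.length
  -- the g and h arrays of B (written once per index, h materialised before the recursion)
  let hArr := (List.range total).map (fun i => hB lists i)
  (fBm (gA lists) (fun i => hArr.getD i 0) total (total - 1) (List.replicate total none)).1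

-- ===== PRECONDITION & SPEC =====

-- Pre_ excludes only the empty outer list, on which A returns float('inf'), not an int.
def Pre_minMergeCost (lists : List (List Int)) : Prop :=
  lists ≠ []
instance (lists : List (List Int)) : Decidable (Pre_minMergeCost lists) := by
  unfold Pre_minMergeCost; infer_instance

def pvWitness_minMergeCost : List (List Int) := [[1, 2], [3]]

def Spec_minMergeCost (lists : List (List Int)) (out : Int) : Prop := out = minMergeCost_alt lists
instance (lists : List (List Int)) (out : Int) : Decidable (Spec_minMergeCost lists out) := by
  unfold Spec_minMergeCost; infer_instance

-- ===== CLAIM (what is proved, stated in full; the proofs are below) =====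
def Claim_equal_minMergeCost : Prop := ∀ (lists : List (List Int)), Dom_minMergeCost lists → Pre_minMergeCost lists → Spec_minMergeCost lists (minMergeCost lists)

-- ===== LEMMAS AND PROOFS =====

-- ---- bit facts ----

theorem submask_le {x i : Nat} (h : x &&& i = x) : x ≤ i := by
  conv_lhs => rw [← h]
  exact Nat.and_le_right

theorem xor_submask {j i : Nat} (h : j &&& i = j) : (i ^^^ j) &&& i = i ^^^ j := by
  apply Nat.eq_of_testBit_eq
  intro b
  have hc := congrArg (fun x => Nat.testBit x b) h
  simp only [Nat.testBit_and, Nat.testBit_xor] at hc ⊢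
  cases hx : i.testBit b <;> cases hy : j.testBit b <;> simp_all

theorem xor_ne_self {i j : Nat} (hj : j ≠ 0) : i ^^^ j ≠ i := by
  intro h
  apply hj
  have := congrArg (fun x => i ^^^ x) h
  simpa [← Nat.xor_assoc, Nat.xor_self] using this

theorem xor_ne_zero {i j : Nat} (hj : j ≠ i) : i ^^^ j ≠ 0 := by
  intro h
  exact hj ((Nat.xor_eq_zero_iff.mp h)).symm

theorem pow2_and_pred (j : Nat) : (2 ^ j) &&& (2 ^ j - 1) = 0 := by
  apply Nat.eq_of_testBit_eq
  intro b
  simp only [Nat.testBit_and, Nat.testBit_two_pow, Nat.testBit_two_pow_sub_one, Nat.zero_testBit]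
  by_cases hjb : j = b <;> simp [hjb]

theorem and_pred_eq_zero_pow2 : ∀ k : Nat, k ≠ 0 → k &&& (k - 1) = 0 → ∃ j, k = 2 ^ j := by
  intro k
  induction k using Nat.strong_induction_on with
  | _ k IH =>
    intro hk h0
    rcases Nat.even_or_odd k with he | ho
    · obtain ⟨m, hm⟩ := he
      have hm0 : m ≠ 0 := by omega
      have hmm : m &&& (m - 1) = 0 := by
        apply Nat.eq_of_testBit_eq
        intro b
        have hb : (k &&& (k - 1)).testBit (b + 1) = false := by
          rw [h0]; exact Nat.zero_testBit _
        rw [Nat.testBit_and] at hb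
        simp only [Nat.testBit_add_one] at hb
        have e1 : k / 2 = m := by omega
        have e2 : (k - 1) / 2 = m - 1 := by omega
        rw [e1, e2] at hb
        rw [Nat.zero_testBit, Nat.testBit_and]
        exact hb
      obtain ⟨j, hj⟩ := IH m (by omega) hm0 hmm
      exact ⟨j + 1, by rw [pow_succ]; omega⟩
    · have hpar : k % 2 = 1 := Nat.odd_iff.mp ho
      by_cases h1 : k = 1
      · exact ⟨0, by simp [h1]⟩
      · exfalso
        have hm0 : k / 2 ≠ 0 := by omega
        obtain ⟨b, hb⟩ := Nat.exists_testBit_of_ne_zero hm0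
        have hbit : (k &&& (k - 1)).testBit (b + 1) = true := by
          rw [Nat.testBit_and]
          simp only [Nat.testBit_add_one]
          have e2 : (k - 1) / 2 = k / 2 := by omega
          rw [e2, hb]
          rfl
        rw [h0] at hbit
        simp [Nat.zero_testBit] at hbit

-- ---- chain facts ----

theorem jChain_mem : ∀ {s i j : Nat}, s &&& i = s → j ∈ jChain i s → j ≠ 0 ∧ j ≤ s ∧ j &&& i = j := by
  intro s
  induction s using Nat.strong_induction_on with
  | _ s IH =>
    intro i j hs hj
    rw [jChain] at hj
    by_cases h0 : s = 0
    · simp [h0] at hj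
    · rw [if_neg h0] at hj
      rcases List.mem_cons.mp hj with rfl | hj'
      · exact ⟨h0, le_refl _, hs⟩
      · have hlt : (s - 1) &&& i < s := Nat.lt_of_le_of_lt Nat.and_le_left (by omega)
        have hsub : ((s - 1) &&& i) &&& i = (s - 1) &&& i := by
          rw [Nat.and_assoc, Nat.and_self]
        obtain ⟨h1, h2, h3⟩ := IH _ hlt hsub hj'
        exact ⟨h1, le_trans h2 (le_trans Nat.and_le_left (by omega)), h3⟩

theorem jChain_props {i j : Nat} (_hi : i ≠ 0) (hj : j ∈ jChain i ((i - 1) &&& i)) :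
    j ≠ 0 ∧ j < i ∧ j &&& i = j ∧ i ^^^ j ≠ 0 ∧ i ^^^ j < i := by
  have hsub : ((i - 1) &&& i) &&& i = (i - 1) &&& i := by rw [Nat.and_assoc, Nat.and_self]
  obtain ⟨h1, h2, h3⟩ := jChain_mem hsub hj
  have hjlt : j < i := by
    have := Nat.and_le_left (n := i - 1) (m := i)
    omega
  refine ⟨h1, hjlt, h3, xor_ne_zero (by omega), ?_⟩
  have hk := submask_le (xor_submask h3)
  have hkne := xor_ne_self (i := i) h1
  omega

theorem jChain_ne_nil {i : Nat} (h : (i - 1) &&& i ≠ 0) : jChain i ((i - 1) &&& i) ≠ [] := by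
  rw [jChain, if_neg h]
  simp

-- ---- proof-layer recursion fB: the common value both DPs compute (no memo) ----

def fB (g h : Nat → Int) : Nat → Nat → Int
  | 0, _ => 0
  | fuel + 1, i =>
    if i &&& (i - 1) = 0 then 0
    else
      let cs := (jChain i ((i - 1) &&& i)).map (fun j =>
        fB g h fuel j + fB g h fuel (i ^^^ j) + g j + g (i ^^^ j) + |h j - h (i ^^^ j)|)
      match cs with
      | [] => 0
      | c :: t => t.foldl min c

-- ---- fB : fuel irrelevance ----

theorem fB_irrel (g h : Nat → Int) : ∀ i u v : Nat, i < u → i < v → fB g h u i = fB g h v i := by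
  intro i
  induction i using Nat.strong_induction_on with
  | _ i IH =>
    intro u v hu hv
    obtain ⟨u', rfl⟩ : ∃ u', u = u' + 1 := ⟨u - 1, by omega⟩
    obtain ⟨v', rfl⟩ : ∃ v', v = v' + 1 := ⟨v - 1, by omega⟩
    simp only [fB]
    by_cases hb : i &&& (i - 1) = 0
    · simp [hb]
    · have hi0 : i ≠ 0 := by rintro rfl; simp at hb
      have hmap : (jChain i ((i - 1) &&& i)).map
            (fun j => fB g h u' j + fB g h u' (i ^^^ j) + g j + g (i ^^^ j) + |h j - h (i ^^^ j)|)
          = (jChain i ((i - 1) &&& i)).map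
            (fun j => fB g h v' j + fB g h v' (i ^^^ j) + g j + g (i ^^^ j) + |h j - h (i ^^^ j)|) := by
        apply List.map_congr_left
        intro j hj
        obtain ⟨hj0, hjlt, hsubm, hk0, hklt⟩ := jChain_props hi0 hj
        rw [IH j hjlt u' v' (by omega) (by omega), IH (i ^^^ j) hklt u' v' (by omega) (by omega)]
      rw [if_neg hb, if_neg hb, hmap]

-- ---- fold helpers ----

theorem optMin_none_left (x : Option Int) : optMin none x = x := rfl

theorem optMin_fold : ∀ (cs : List Int) (v : Int),
    cs.foldl (fun o c => optMin o (some c)) (some v) = some (cs.foldl min v) := by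
  intro cs
  induction cs with
  | nil => intro v; rfl
  | cons c t IH =>
    intro v
    simp only [List.foldl_cons, optMin]
    exact IH (min v c)

-- ---- A's DP table = fB ----

theorem getD_set_ne (f : List (Option Int)) {i j : Nat} (v : Option Int) (h : i ≠ j) :
    (f.set i v).getD j none = f.getD j none := by
  simp [List.getD, List.getElem?_set_ne h]

theorem getD_set_self (f : List (Option Int)) {i : Nat} (v : Option Int) (h : i < f.length) :
    (f.set i v).getD i none = v := by
  simp [List.getD, h]

theorem getD_eq_getElem (f : List (Option Int)) {i : Nat} (h : i < f.length) :
    f.getD i none = f[i] := by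
  simp [List.getD, List.getElem?_eq_getElem h]

theorem row_fold_eq (g h : Nat → Int) (F : Nat → Int) (i : Nat) :
    ∀ (chain : List Nat) (f : List (Option Int)), i < f.length →
    (∀ j ∈ chain, j ≠ i ∧ i ^^^ j ≠ i ∧ f.getD j none = some (F j) ∧ f.getD (i ^^^ j) none = some (F (i ^^^ j))) →
    chain.foldl
      (fun f j =>
        let k := i ^^^ j
        f.set i (optMin (f.getD i none)
          (optAdd (optAdd (f.getD j none) (f.getD k none))
            (some (g j + g k + |h j - h k|))))) f
      = f.set i (chain.foldl
          (fun o j => optMin o (some (F j + F (i ^^^ j) + g j + g (i ^^^ j) + |h j - h (i ^^^ j)|)))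
          (f.getD i none)) := by
  intro chain
  induction chain with
  | nil =>
    intro f hlen _
    simp only [List.foldl_nil]
    rw [getD_eq_getElem f hlen]
    exact (List.set_getElem_self hlen).symm
  | cons j t IH =>
    intro f hlen hv
    obtain ⟨hji, hki, hfj, hfk⟩ := hv j List.mem_cons_self
    simp only [List.foldl_cons]
    rw [hfj, hfk]
    have hadd : optAdd (optAdd (some (F j)) (some (F (i ^^^ j))))
        (some (g j + g (i ^^^ j) + |h j - h (i ^^^ j)|))
        = some (F j + F (i ^^^ j) + g j + g (i ^^^ j) + |h j - h (i ^^^ j)|) := by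
      simp only [optAdd]
      congr 1
      ring
    rw [hadd]
    have hlen' : i < (f.set i (optMin (f.getD i none)
        (some (F j + F (i ^^^ j) + g j + g (i ^^^ j) + |h j - h (i ^^^ j)|)))).length := by
      simpa [List.length_set] using hlen
    rw [IH _ hlen' ?_]
    · rw [List.set_set, getD_set_self f _ hlen]
    · intro j' hj'
      obtain ⟨h1, h2, h3, h4⟩ := hv j' (List.mem_cons_of_mem _ hj')
      exact ⟨h1, h2, by rw [getD_set_ne f _ (Ne.symm h1)]; exact h3,
        by rw [getD_set_ne f _ (Ne.symm h2)]; exact h4⟩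

def initT (n : Nat) : List (Option Int) :=
  (List.range n).foldl (fun f j => f.set (2 ^ j) (some 0)) (List.replicate (2 ^ n) none)

theorem foldl_set_length : ∀ (rs : List Nat) (f : List (Option Int)),
    (rs.foldl (fun f j => f.set (2 ^ j) (some 0)) f).length = f.length := by
  intro rs
  induction rs with
  | nil => intro f; rfl
  | cons r t IH => intro f; simp [IH, List.length_set]

theorem initT_length (n : Nat) : (initT n).length = 2 ^ n := by
  unfold initT
  rw [foldl_set_length]
  exact List.length_replicate

theorem foldl_set_getD : ∀ (rs : List Nat) (f : List (Option Int)) (k : Nat),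
    (∀ j ∈ rs, 2 ^ j < f.length) →
    (rs.foldl (fun f j => f.set (2 ^ j) (some 0)) f).getD k none
      = if ∃ j ∈ rs, k = 2 ^ j then some 0 else f.getD k none := by
  intro rs
  induction rs with
  | nil => intro f k _; simp
  | cons r t IH =>
    intro f k hlen
    simp only [List.foldl_cons]
    rw [IH _ k (by intro j hj; rw [List.length_set]; exact hlen j (List.mem_cons_of_mem _ hj))]
    by_cases hk : ∃ j ∈ t, k = 2 ^ j
    · rw [if_pos hk, if_pos (by obtain ⟨j, hj1, hj2⟩ := hk; exact ⟨j, List.mem_cons_of_mem _ hj1, hj2⟩)]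
    · rw [if_neg hk]
      by_cases hkr : k = 2 ^ r
      · subst hkr
        rw [getD_set_self f _ (hlen r List.mem_cons_self)]
        rw [if_pos ⟨r, List.mem_cons_self, rfl⟩]
      · rw [getD_set_ne f _ (fun he => hkr he.symm)]
        rw [if_neg (by rintro ⟨j, hj1, hj2⟩
                       rcases List.mem_cons.mp hj1 with rfl | hj1'
                       · exact hkr hj2
                       · exact hk ⟨j, hj1', hj2⟩)]

theorem initT_getD (n k : Nat) :
    (initT n).getD k none = if ∃ j, j < n ∧ k = 2 ^ j then some 0 else none := by
  unfold initT
  rw [foldl_set_getD _ _ k (by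
    intro j hj
    rw [List.length_replicate]
    exact Nat.pow_lt_pow_right (by norm_num) (List.mem_range.mp hj))]
  have hrep : (List.replicate (2 ^ n) (none : Option Int)).getD k none = none := by
    by_cases hk : k < 2 ^ n
    · simp [List.getD, hk]
    · simp [List.getD, hk]
  rw [hrep]
  congr 1
  · simp only [eq_iff_iff]
    constructor
    · rintro ⟨j, hj1, hj2⟩; exact ⟨j, List.mem_range.mp hj1, hj2⟩
    · rintro ⟨j, hj1, hj2⟩; exact ⟨j, List.mem_range.mpr hj1, hj2⟩

theorem loop_inv (g h : Nat → Int) (n : Nat) : ∀ t : Nat, t ≤ 2 ^ n - 1 →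
    ((List.range' 1 t).foldl (rowA g h) (initT n)).length = 2 ^ n ∧
    ∀ k, k < 2 ^ n →
      ((List.range' 1 t).foldl (rowA g h) (initT n)).getD k none =
        if 1 ≤ k ∧ k ≤ t then some (fB g h (k + 1) k) else (initT n).getD k none := by
  intro t
  induction t with
  | zero =>
    intro _
    refine ⟨initT_length n, ?_⟩
    intro k _
    simp only [List.range'_zero, List.foldl_nil]
    rw [if_neg (by omega)]
  | succ t IH =>
    intro ht
    obtain ⟨IHlen, IHget⟩ := IH (by omega)
    have hone : 1 ≤ 2 ^ n := Nat.one_le_two_pow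
    have hi_lt : t + 1 < 2 ^ n := by omega
    have hsplit : List.range' 1 (t + 1) = List.range' 1 t ++ [1 + 1 * t] := List.range'_concat
    rw [hsplit, List.foldl_append]
    have honet : 1 + 1 * t = t + 1 := by omega
    rw [honet]
    set ft := (List.range' 1 t).foldl (rowA g h) (initT n) with hft
    have hEntry : ft.getD (t + 1) none
        = if ∃ j, j < n ∧ t + 1 = 2 ^ j then some 0 else none := by
      rw [IHget (t + 1) hi_lt, if_neg (by omega), initT_getD]
    simp only [List.foldl_cons, List.foldl_nil]
    unfold rowA
    by_cases hPi : ∃ j, j < n ∧ t + 1 = 2 ^ j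
    · rw [if_pos (by rw [hEntry, if_pos hPi])]
      refine ⟨IHlen, ?_⟩
      intro k hk
      rw [IHget k hk]
      by_cases hk1 : 1 ≤ k ∧ k ≤ t
      · rw [if_pos hk1, if_pos (by omega)]
      · by_cases hki : k = t + 1
        · subst hki
          rw [if_neg hk1, if_pos (by omega), initT_getD, if_pos hPi]
          obtain ⟨j, _, hej⟩ := hPi
          have hFz : fB g h (t + 1 + 1) (t + 1) = 0 := by
            simp only [fB]
            rw [if_pos (by rw [hej]; exact pow2_and_pred j)]
          rw [hFz]
        · rw [if_neg hk1, if_neg (by omega)]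
    · have hentry_none : ft.getD (t + 1) none = none := by rw [hEntry, if_neg hPi]
      rw [if_neg (by rw [hentry_none]; simp)]
      have hi0 : t + 1 ≠ 0 := by omega
      have hand : (t + 1) &&& (t + 1 - 1) ≠ 0 := by
        intro h0
        obtain ⟨j, hj⟩ := and_pred_eq_zero_pow2 (t + 1) hi0 h0
        have hjn : j < n := by
          have hlt2 : (2 : Nat) ^ j < 2 ^ n := by rw [← hj]; exact hi_lt
          exact (Nat.pow_lt_pow_iff_right (by norm_num)).mp hlt2
        exact hPi ⟨j, hjn, hj⟩
      have hand' : (t + 1 - 1) &&& (t + 1) ≠ 0 := by rw [Nat.and_comm]; exact hand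
      have hcond : ∀ j ∈ jChain (t + 1) ((t + 1 - 1) &&& (t + 1)),
          j ≠ t + 1 ∧ (t + 1) ^^^ j ≠ t + 1 ∧ ft.getD j none = some (fB g h (j + 1) j) ∧
          ft.getD ((t + 1) ^^^ j) none = some (fB g h (((t + 1) ^^^ j) + 1) ((t + 1) ^^^ j)) := by
        intro j hj
        obtain ⟨hj0, hjlt, _, hk0, hklt⟩ := jChain_props hi0 hj
        refine ⟨by omega, by omega, ?_, ?_⟩
        · rw [IHget j (by omega), if_pos (by omega)]
        · rw [IHget ((t + 1) ^^^ j) (by omega), if_pos (by omega)]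
      have hlen : t + 1 < ft.length := by rw [IHlen]; exact hi_lt
      rw [row_fold_eq g h (fun k => fB g h (k + 1) k) (t + 1) _ ft hlen hcond]
      refine ⟨by rw [List.length_set, IHlen], ?_⟩
      intro k hk
      by_cases hki : k = t + 1
      · subst hki
        rw [getD_set_self ft _ hlen, if_pos (by omega), hentry_none]
        obtain ⟨c, rest, hchain⟩ : ∃ c rest, jChain (t + 1) ((t + 1 - 1) &&& (t + 1)) = c :: rest :=
          List.exists_cons_of_ne_nil (jChain_ne_nil hand')
        rw [hchain]
        simp only [List.foldl_cons, optMin_none_left]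
        rw [← List.foldl_map (f := fun j => fB g h (j + 1) j + fB g h (((t + 1) ^^^ j) + 1) ((t + 1) ^^^ j) + g j + g ((t + 1) ^^^ j) + |h j - h ((t + 1) ^^^ j)|)
              (g := fun o c => optMin o (some c)), optMin_fold]
        have hFi : fB g h (t + 1 + 1) (t + 1)
            = (rest.map (fun j => fB g h (j + 1) j + fB g h (((t + 1) ^^^ j) + 1) ((t + 1) ^^^ j) + g j + g ((t + 1) ^^^ j) + |h j - h ((t + 1) ^^^ j)|)).foldl min
              (fB g h (c + 1) c + fB g h (((t + 1) ^^^ c) + 1) ((t + 1) ^^^ c) + g c + g ((t + 1) ^^^ c) + |h c - h ((t + 1) ^^^ c)|) := by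
          conv_lhs => rw [fB]
          rw [if_neg hand]
          have hmap : (jChain (t + 1) ((t + 1 - 1) &&& (t + 1))).map
                (fun j => fB g h (t + 1) j + fB g h (t + 1) ((t + 1) ^^^ j) + g j + g ((t + 1) ^^^ j) + |h j - h ((t + 1) ^^^ j)|)
              = (jChain (t + 1) ((t + 1 - 1) &&& (t + 1))).map
                (fun j => fB g h (j + 1) j + fB g h (((t + 1) ^^^ j) + 1) ((t + 1) ^^^ j) + g j + g ((t + 1) ^^^ j) + |h j - h ((t + 1) ^^^ j)|) := by
            apply List.map_congr_left
            intro j hj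
            obtain ⟨hj0, hjlt, _, hk0, hklt⟩ := jChain_props hi0 hj
            rw [fB_irrel g h j (t + 1) (j + 1) (by omega) (by omega),
               fB_irrel g h ((t + 1) ^^^ j) (t + 1) (((t + 1) ^^^ j) + 1) (by omega) (by omega)]
          rw [hmap, hchain]
          simp only [List.map_cons]
        rw [hFi]
      · rw [getD_set_ne ft _ (fun he => hki he.symm), IHget k hk]
        by_cases hk1 : 1 ≤ k ∧ k ≤ t
        · rw [if_pos hk1, if_pos (by omega)]
        · rw [if_neg hk1, if_neg (by omega)]

theorem minMergeCost_eq_fB (lists : List (List Int)) (hne : lists ≠ []) :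
    minMergeCost lists
      = fB (gA lists) (hA lists) (2 ^ lists.length) (2 ^ lists.length - 1) := by
  have hn1 : 1 ≤ lists.length := List.length_pos_of_ne_nil hne
  have h2 : 2 ≤ 2 ^ lists.length := by
    calc (2:Nat) = 2 ^ 1 := by norm_num
    _ ≤ 2 ^ lists.length := Nat.pow_le_pow_right (by norm_num) hn1
  obtain ⟨hlen, hget⟩ := loop_inv (gA lists) (hA lists) lists.length (2 ^ lists.length - 1) (le_refl _)
  have hfin := hget (2 ^ lists.length - 1) (by omega)
  rw [if_pos (by omega)] at hfin
  have hinit : (List.range lists.length).foldl (fun f j => f.set (2 ^ j) (some 0))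
      (List.replicate (2 ^ lists.length) (none : Option Int)) = initT lists.length := rfl
  show (match ((List.range' 1 (2 ^ lists.length - 1)).foldl (rowA (gA lists) (hA lists))
      ((List.range lists.length).foldl (fun f j => f.set (2 ^ j) (some 0))
        (List.replicate (2 ^ lists.length) (none : Option Int)))).getD (2 ^ lists.length - 1) none with
    | some v => v
    | none => 0) = fB (gA lists) (hA lists) (2 ^ lists.length) (2 ^ lists.length - 1)
  rw [hinit, hfin]
  show fB (gA lists) (hA lists) (2 ^ lists.length - 1 + 1) (2 ^ lists.length - 1) = _
  rw [show 2 ^ lists.length - 1 + 1 = 2 ^ lists.length from by omega]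

-- ---- phase 1 : g and h agree ----

-- ---- phase 1 : the two value searches agree (cnt is monotone for arbitrary lists) ----

theorem bLoop_bounds (xs : List Int) (x : Int) : ∀ (fuel lo hi : Nat), lo ≤ hi →
    lo ≤ PySem.List.bisectRightLoop xs x fuel lo hi ∧
    PySem.List.bisectRightLoop xs x fuel lo hi ≤ hi := by
  intro fuel
  induction fuel with
  | zero =>
    intro lo hi h
    simp only [PySem.List.bisectRightLoop]
    omega
  | succ fuel IH =>
    intro lo hi h
    simp only [PySem.List.bisectRightLoop]
    split
    · split
      · split
        · have := IH lo ((lo + hi) / 2) (by omega)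
          omega
        · have := IH ((lo + hi) / 2 + 1) hi (by omega)
          omega
      · omega
    · omega

theorem bLoop_mono (xs : List Int) (x1 x2 : Int) (hx : x1 ≤ x2) : ∀ (fuel lo hi : Nat), lo ≤ hi →
    PySem.List.bisectRightLoop xs x1 fuel lo hi ≤ PySem.List.bisectRightLoop xs x2 fuel lo hi := by
  intro fuel
  induction fuel with
  | zero =>
    intro lo hi _
    simp only [PySem.List.bisectRightLoop]
    omega
  | succ fuel IH =>
    intro lo hi h
    simp only [PySem.List.bisectRightLoop]
    by_cases hlt : lo < hi
    · simp only [if_pos hlt]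
      cases hxs : xs[(lo + hi) / 2]? with
      | none => simp
      | some y =>
        simp only
        by_cases h1 : x1 < y
        · by_cases h2 : x2 < y
          · simp only [if_pos h1, if_pos h2]
            exact IH lo ((lo + hi) / 2) (by omega)
          · simp only [if_pos h1, if_neg h2]
            have hb1 := bLoop_bounds xs x1 fuel lo ((lo + hi) / 2) (by omega)
            have hb2 := bLoop_bounds xs x2 fuel ((lo + hi) / 2 + 1) hi (by omega)
            omega
        · have h2 : ¬x2 < y := by omega
          simp only [if_neg h1, if_neg h2]
          exact IH ((lo + hi) / 2 + 1) hi (by omega)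
    · simp only [if_neg hlt]
      omega

theorem bisectRight_mono (xs : List Int) {x1 x2 : Int} (hx : x1 ≤ x2) :
    PySem.List.bisectRight xs x1 ≤ PySem.List.bisectRight xs x2 :=
  bLoop_mono xs x1 x2 hx xs.length 0 xs.length (Nat.zero_le _)

theorem cnt_mono (lists : List (List Int)) (i : Nat) {x1 x2 : Int} (hx : x1 ≤ x2) :
    cntA lists i x1 ≤ cntA lists i x2 := by
  unfold cntA
  have key : ∀ (rs : List Nat) (a1 a2 : Int), a1 ≤ a2 →
      rs.foldl (fun acc j => if (i >>> j) &&& 1 = 1 then acc + ((PySem.List.bisectRight (lists.getD j []) x1 : Nat) : Int) else acc) a1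
      ≤ rs.foldl (fun acc j => if (i >>> j) &&& 1 = 1 then acc + ((PySem.List.bisectRight (lists.getD j []) x2 : Nat) : Int) else acc) a2 := by
    intro rs
    induction rs with
    | nil => intro a1 a2 h; exact h
    | cons r t IH =>
      intro a1 a2 h
      simp only [List.foldl_cons]
      by_cases hb : (i >>> r) &&& 1 = 1
      · rw [if_pos hb, if_pos hb]
        refine IH _ _ ?_
        have := bisectRight_mono (lists.getD r []) hx
        omega
      · rw [if_neg hb, if_neg hb]
        exact IH _ _ h
  exact key (List.range lists.length) 0 0 (le_refl _)

-- the unique "least x in [lo,hi] with P x (or hi if none)" characterisation shared by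
-- A's halving search and B's galloping search
theorem least_unique {P : Int → Bool} {lo hi r1 r2 : Int}
    (h1 : lo ≤ r1 ∧ r1 ≤ hi ∧ (∀ x, lo ≤ x → x < r1 → P x = false) ∧ (r1 < hi → P r1 = true))
    (h2 : lo ≤ r2 ∧ r2 ≤ hi ∧ (∀ x, lo ≤ x → x < r2 → P x = false) ∧ (r2 < hi → P r2 = true)) :
    r1 = r2 := by
  obtain ⟨a1, b1, c1, d1⟩ := h1
  obtain ⟨a2, b2, c2, d2⟩ := h2
  rcases lt_trichotomy r1 r2 with hlt | heq | hgt
  · have hp := d1 (by omega)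
    have hq := c2 r1 (by omega) hlt
    rw [hp] at hq
    exact absurd hq (by simp)
  · exact heq
  · have hp := d2 (by omega)
    have hq := c1 r2 (by omega) hgt
    rw [hp] at hq
    exact absurd hq (by simp)

theorem bsInt_least (P : Int → Bool) : ∀ (n : Nat) (lo hi : Int), (hi - lo).toNat ≤ n → lo ≤ hi →
    (∀ a b, lo ≤ a → a ≤ b → b ≤ hi → P a = true → P b = true) →
    lo ≤ bsInt P lo hi ∧ bsInt P lo hi ≤ hi ∧
    (∀ x, lo ≤ x → x < bsInt P lo hi → P x = false) ∧
    (bsInt P lo hi < hi → P (bsInt P lo hi) = true) := by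
  intro n
  induction n with
  | zero =>
    intro lo hi hn hlohi _
    rw [bsInt, dif_neg (by omega)]
    refine ⟨le_refl _, hlohi, ?_, by omega⟩
    intro x h1 h2
    omega
  | succ n IH =>
    intro lo hi hn hlohi hmono
    rw [bsInt]
    by_cases hlt : lo < hi
    · rw [dif_pos hlt]
      obtain ⟨hm1, hm2⟩ := floordiv_two_bounds lo hi hlt
      by_cases hP : P (PySem.Int.floordiv (lo + hi) 2) = true
      · simp only [hP, if_true]
        obtain ⟨i1, i2, i3, i4⟩ := IH lo (PySem.Int.floordiv (lo + hi) 2) (by omega) (by omega)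
          (fun a b ha hab hb => hmono a b ha hab (by omega))
        refine ⟨i1, by omega, i3, ?_⟩
        intro hr
        by_cases hre : bsInt P lo (PySem.Int.floordiv (lo + hi) 2) < PySem.Int.floordiv (lo + hi) 2
        · exact i4 hre
        · have : bsInt P lo (PySem.Int.floordiv (lo + hi) 2) = PySem.Int.floordiv (lo + hi) 2 := by omega
          rw [this]
          exact hP
      · have hPf : P (PySem.Int.floordiv (lo + hi) 2) = false := by
          cases hc : P (PySem.Int.floordiv (lo + hi) 2)
          · rfl
          · exact absurd hc hP
        simp only [hPf, Bool.false_eq_true, if_false]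
        obtain ⟨i1, i2, i3, i4⟩ := IH (PySem.Int.floordiv (lo + hi) 2 + 1) hi (by omega) (by omega)
          (fun a b ha hab hb => hmono a b (by omega) hab hb)
        refine ⟨by omega, i2, ?_, i4⟩
        intro x hx1 hx2
        by_cases hxm : PySem.Int.floordiv (lo + hi) 2 + 1 ≤ x
        · exact i3 x hxm hx2
        · cases hc : P x
          · rfl
          · have := hmono x (PySem.Int.floordiv (lo + hi) 2) hx1 (by omega) (by omega) hc
            rw [this] at hPf
            exact absurd hPf (by simp)
    · rw [dif_neg hlt]
      refine ⟨le_refl _, hlohi, ?_, by omega⟩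
      intro x h1 h2
      omega

theorem gallop_inv (P : Int → Bool) (lo hi : Int)
    (hmono : ∀ a b, lo ≤ a → a ≤ b → b ≤ hi → P a = true → P b = true) :
    ∀ (k : Nat) (y : Int), lo - 1 ≤ y → y ≤ hi → (y < lo ∨ P y = false) →
    y ≤ gallop P hi k y ∧ gallop P hi k y ≤ hi ∧ gallop P hi k y ≤ y + 2 ^ k - 1 ∧
    (gallop P hi k y < lo ∨ P (gallop P hi k y) = false) ∧
    (∀ z, gallop P hi k y < z → z ≤ hi → z ≤ y + 2 ^ k - 1 → P z = true) := by
  intro k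
  induction k with
  | zero =>
    intro y h1 h2 h3
    simp only [gallop]
    refine ⟨le_refl _, h2, by norm_num, h3, ?_⟩
    intro z hz1 _ hz3
    norm_num at hz3
    omega
  | succ k IH =>
    intro y h1 h2 h3
    have h2k : (1 : Int) ≤ 2 ^ k := by
      have := pow_pos (show (0:Int) < 2 by norm_num) k
      omega
    have hps : (2 : Int) ^ (k + 1) = 2 ^ k + 2 ^ k := by rw [pow_succ]; ring
    simp only [gallop]
    by_cases hc : y + 2 ^ k ≤ hi ∧ P (y + 2 ^ k) = false
    · rw [if_pos hc]
      obtain ⟨i1, i2, i3, i4, i5⟩ := IH (y + 2 ^ k) (by omega) hc.1 (Or.inr hc.2)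
      refine ⟨by omega, i2, by omega, i4, ?_⟩
      intro z hz1 hz2 hz3
      exact i5 z hz1 hz2 (by omega)
    · rw [if_neg hc]
      obtain ⟨i1, i2, i3, i4, i5⟩ := IH y h1 h2 h3
      refine ⟨i1, i2, by omega, i4, ?_⟩
      intro z hz1 hz2 hz3
      by_cases hzs : z ≤ y + 2 ^ k - 1
      · exact i5 z hz1 hz2 hzs
      · rcases Decidable.not_and_iff_or_not.mp hc with hc1 | hc2
        · omega
        · have hPt : P (y + 2 ^ k) = true := by
            cases hp : P (y + 2 ^ k)
            · exact absurd hp hc2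
            · rfl
          exact hmono (y + 2 ^ k) z (by omega) (by omega) hz2 hPt

theorem h_eq (lists : List (List Int)) (i : Nat) : hA lists i = hB lists i := by
  unfold hA hB
  dsimp only
  set P : Int → Bool := fun t => decide (PySem.Int.floordiv (gA lists i + 1) 2 ≤ cntA lists i t) with hP
  have hmono : ∀ a b : Int, (-1000000000 : Int) ≤ a → a ≤ b → b ≤ 1000000000 → P a = true → P b = true := by
    intro a b _ hab _ hpa
    rw [hP] at hpa ⊢
    simp only [decide_eq_true_eq] at hpa ⊢
    have := cnt_mono lists i hab
    omega
  have hA4 := bsInt_least P ((1000000000 - (-1000000000) : Int)).toNat (-1000000000) 1000000000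
    (le_refl _) (by norm_num) hmono
  have hinv := gallop_inv P (-1000000000) 1000000000 hmono 32 (-1000000000 - 1)
    (le_refl _) (by norm_num) (Or.inl (by norm_num))
  obtain ⟨g1, g2, g3, g4, g5⟩ := hinv
  set y := gallop P 1000000000 32 (-1000000000 - 1) with hy
  have hpow : (2 : Int) ^ 32 = 4294967296 := by norm_num
  refine least_unique hA4 ⟨?_, ?_, ?_, ?_⟩
  · omega
  · omega
  · intro x hx1 hx2
    have hxy : x ≤ y := by omega
    rcases g4 with hg4 | hg4
    · omega
    · cases hc : P x
      · rfl
      · have := hmono x y hx1 hxy (by omega) hc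
        rw [this] at hg4
        exact absurd hg4 (by simp)
  · intro hlt
    have hy1 : min (y + 1) (1000000000 : Int) = y + 1 := by omega
    rw [hy1] at hlt ⊢
    exact g5 (y + 1) (by omega) (by omega) (by omega)

-- ---- B's memoized recursion computes fB ----

theorem fB_congr (g h1 h2 : Nat → Int) (N : Nat) (hh : ∀ k, k < N → h1 k = h2 k) :
    ∀ i, i < N → ∀ fuel, fB g h1 fuel i = fB g h2 fuel i := by
  intro i
  induction i using Nat.strong_induction_on with
  | _ i IH =>
    intro hiN fuel
    cases fuel with
    | zero => rfl
    | succ fu =>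
      simp only [fB]
      by_cases hb : i &&& (i - 1) = 0
      · simp [hb]
      · have hi0 : i ≠ 0 := by rintro rfl; simp at hb
        have hmap : (jChain i ((i - 1) &&& i)).map
              (fun j => fB g h1 fu j + fB g h1 fu (i ^^^ j) + g j + g (i ^^^ j) + |h1 j - h1 (i ^^^ j)|)
            = (jChain i ((i - 1) &&& i)).map
              (fun j => fB g h2 fu j + fB g h2 fu (i ^^^ j) + g j + g (i ^^^ j) + |h2 j - h2 (i ^^^ j)|) := by
          apply List.map_congr_left
          intro j hj
          obtain ⟨hj0, hjlt, _, hk0, hklt⟩ := jChain_props hi0 hj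
          rw [IH j hjlt (by omega) fu, IH (i ^^^ j) hklt (by omega) fu,
            hh j (by omega), hh (i ^^^ j) (by omega)]
        rw [if_neg hb, if_neg hb, hmap]

theorem inv_set (mm : List (Option Int)) (i : Nat) (w : Int) (F : Nat → Int)
    (hinv : ∀ k v, mm.getD k none = some v → v = F k) (hw : w = F i) :
    ∀ k v, (mm.set i w).getD k none = some v → v = F k := by
  intro k v hk
  by_cases hki : k = i
  · subst hki
    by_cases hlen : k < mm.length
    · rw [getD_set_self _ _ hlen] at hk
      rw [← Option.some_inj.mp hk, hw]
    · rw [List.set_eq_of_length_le (by omega)] at hk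
      exact hinv k v hk
  · rw [getD_set_ne _ _ (fun he => hki he.symm)] at hk
    exact hinv k v hk

theorem fBm_correct (g h : Nat → Int) :
    ∀ (i fuel : Nat) (memo : List (Option Int)), i < fuel →
    (∀ k v, memo.getD k none = some v → v = fB g h (k + 1) k) →
    (fBm g h fuel i memo).1 = fB g h (i + 1) i ∧
    (∀ k v, (fBm g h fuel i memo).2.getD k none = some v → v = fB g h (k + 1) k) := by
  intro i
  induction i using Nat.strong_induction_on with
  | _ i IH =>
    intro fuel memo hfu hinv
    obtain ⟨fu, rfl⟩ : ∃ fu, fuel = fu + 1 := ⟨fuel - 1, by omega⟩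
    simp only [fBm]
    by_cases hb : i &&& (i - 1) = 0
    · rw [if_pos hb]
      exact ⟨by rw [fB, if_pos hb], hinv⟩
    · rw [if_neg hb]
      have hi0 : i ≠ 0 := by rintro rfl; simp at hb
      cases hm : memo.getD i none with
      | some v =>
        simp only
        exact ⟨hinv i v hm, hinv⟩
      | none =>
        simp only
        have hfold : ∀ (chain : List Nat), (∀ j ∈ chain, j < i ∧ i ^^^ j < i) →
            ∀ (b : Option Int) (mm : List (Option Int)),
            (∀ k v, mm.getD k none = some v → v = fB g h (k + 1) k) →
            (chain.foldl
              (fun bm j =>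
                let r1 := fBm g h fu j bm.2
                let r2 := fBm g h fu (i ^^^ j) r1.2
                (optMin bm.1 (some (r1.1 + r2.1 + g j + g (i ^^^ j) + |h j - h (i ^^^ j)|)), r2.2))
              (b, mm)).1
              = chain.foldl (fun o j => optMin o (some (fB g h (j + 1) j + fB g h ((i ^^^ j) + 1) (i ^^^ j) + g j + g (i ^^^ j) + |h j - h (i ^^^ j)|))) b
            ∧ ∀ k v, (chain.foldl
              (fun bm j =>
                let r1 := fBm g h fu j bm.2
                let r2 := fBm g h fu (i ^^^ j) r1.2
                (optMin bm.1 (some (r1.1 + r2.1 + g j + g (i ^^^ j) + |h j - h (i ^^^ j)|)), r2.2))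
              (b, mm)).2.getD k none = some v → v = fB g h (k + 1) k := by
          intro chain
          induction chain with
          | nil => intro _ b mm hmm; exact ⟨rfl, hmm⟩
          | cons j t IHc =>
            intro hmem b mm hmm
            obtain ⟨hj1, hj2⟩ := hmem j List.mem_cons_self
            obtain ⟨e1, v1⟩ := IH j hj1 fu mm (by omega) hmm
            obtain ⟨e2, v2⟩ := IH (i ^^^ j) hj2 fu (fBm g h fu j mm).2 (by omega) v1
            simp only [List.foldl_cons]
            rw [e1, e2]
            exact IHc (fun j' hj' => hmem j' (List.mem_cons_of_mem _ hj')) _ _ v2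
        have hprops : ∀ j ∈ jChain i ((i - 1) &&& i), j < i ∧ i ^^^ j < i := by
          intro j hj
          obtain ⟨_, hjlt, _, _, hklt⟩ := jChain_props hi0 hj
          exact ⟨hjlt, hklt⟩
        obtain ⟨hv, hinv'⟩ := hfold (jChain i ((i - 1) &&& i)) hprops none memo hinv
        have hand : (i - 1) &&& i ≠ 0 := by
          intro h0
          exact hb (by rw [Nat.and_comm]; exact h0)
        obtain ⟨c, rest, hchain⟩ := List.exists_cons_of_ne_nil (jChain_ne_nil hand)
        have hFi : fB g h (i + 1) i
            = (rest.map (fun j => fB g h (j + 1) j + fB g h ((i ^^^ j) + 1) (i ^^^ j) + g j + g (i ^^^ j) + |h j - h (i ^^^ j)|)).foldl min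
              (fB g h (c + 1) c + fB g h ((i ^^^ c) + 1) (i ^^^ c) + g c + g (i ^^^ c) + |h c - h (i ^^^ c)|) := by
          conv_lhs => rw [fB]
          rw [if_neg hb]
          have hmap : (jChain i ((i - 1) &&& i)).map
                (fun j => fB g h i j + fB g h i (i ^^^ j) + g j + g (i ^^^ j) + |h j - h (i ^^^ j)|)
              = (jChain i ((i - 1) &&& i)).map
                (fun j => fB g h (j + 1) j + fB g h ((i ^^^ j) + 1) (i ^^^ j) + g j + g (i ^^^ j) + |h j - h (i ^^^ j)|) := by
            apply List.map_congr_left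
            intro j hj
            obtain ⟨hj0, hjlt, _, hk0, hklt⟩ := jChain_props hi0 hj
            rw [fB_irrel g h j i (j + 1) (by omega) (by omega),
              fB_irrel g h (i ^^^ j) i ((i ^^^ j) + 1) (by omega) (by omega)]
          rw [hmap, hchain]
          simp only [List.map_cons]
        have hval : (jChain i ((i - 1) &&& i)).foldl
            (fun o j => optMin o (some (fB g h (j + 1) j + fB g h ((i ^^^ j) + 1) (i ^^^ j) + g j + g (i ^^^ j) + |h j - h (i ^^^ j)|))) none
            = some (fB g h (i + 1) i) := by
          rw [hchain]
          simp only [List.foldl_cons, optMin_none_left]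
          rw [← List.foldl_map
            (f := fun j => fB g h (j + 1) j + fB g h ((i ^^^ j) + 1) (i ^^^ j) + g j + g (i ^^^ j) + |h j - h (i ^^^ j)|)
            (g := fun o c => optMin o (some c)), optMin_fold, hFi]
        rw [hv] at *
        rw [hval]
        exact ⟨rfl, inv_set _ i _ _ hinv' rfl⟩

-- ===== VERDICT (by name: the statement is the Claim_ definition above) =====
theorem minMergeCost_spec : Claim_equal_minMergeCost := by
  intro lists _hdom hne
  unfold Spec_minMergeCost
  rw [minMergeCost_eq_fB lists hne]
  have hone : 1 ≤ 2 ^ lists.length := Nat.one_le_two_pow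
  have hrepN : ∀ k : Nat, (List.replicate (2 ^ lists.length) (none : Option Int)).getD k none = none := by
    intro k
    by_cases hk : k < 2 ^ lists.length
    · simp [List.getD, hk]
    · simp [List.getD, hk]
  obtain ⟨hval, _⟩ := fBm_correct (gA lists)
    (fun i => ((List.range (2 ^ lists.length)).map (fun i => hB lists i)).getD i 0)
    (2 ^ lists.length - 1) (2 ^ lists.length) (List.replicate (2 ^ lists.length) none)
    (by omega) (by intro k v hk; rw [hrepN k] at hk; exact absurd hk (by simp))
  have halt : minMergeCost_alt lists
      = fB (gA lists) (hA lists) (2 ^ lists.length) (2 ^ lists.length - 1) := by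
    show (fBm (gA lists)
      (fun i => ((List.range (2 ^ lists.length)).map (fun i => hB lists i)).getD i 0)
      (2 ^ lists.length) (2 ^ lists.length - 1) (List.replicate (2 ^ lists.length) none)).1 = _
    rw [hval]
    rw [fB_congr (gA lists)
      (fun i => ((List.range (2 ^ lists.length)).map (fun i => hB lists i)).getD i 0)
      (hA lists) (2 ^ lists.length)
      (by
        intro k hk
        dsimp only
        have hmapk : ((List.range (2 ^ lists.length)).map (fun i => hB lists i)).getD k 0
            = hB lists k := by
          rw [List.getD_eq_getElem _ _ (by simpa using hk)]
          simp
        rw [hmapk]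
        exact (h_eq lists k).symm)
      (2 ^ lists.length - 1) (by omega) (2 ^ lists.length - 1 + 1)]
    rw [show 2 ^ lists.length - 1 + 1 = 2 ^ lists.length from by omega]
  rw [halt]
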